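-- pv_equiv track=rewrite | github.com/Ogomokolo/cs331-s21-ookolo | lab02/lab02.py | compute_ngrams
-- ===== SOURCE A (Python) =====
-- def compute_ngrams(toks, n=2):
--     """Returns an n-gram dictionary based on the provided list of tokens."""
--     arr = []
--     for i in range (len(toks)-(n-1)):
--         arr1 = []
--         j = i
--         while j < (i+n):
--             arr1.append(toks[j])
--             j += 1
--         arr.append(tuple(arr1))
--     d = {}
--     for i in arr:
--         if i[0] not in d:
--             d[i[0]] = [tuple(i[k] for k in range(1, len(i)))]
--         else:
--             d[i[0]].append(tuple([i[k] for k in range(1, len(i))]))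
--     return d
-- ===== SOURCE B (Python) =====
-- def compute_ngrams(toks, n=2):
--     """Returns an n-gram dictionary based on the provided list of tokens."""
--     d = {}
--     for i in range(len(toks) - (n - 1)):
--         d.setdefault(toks[i], []).append(tuple(toks[i + 1:i + n]))
--     return d
-- ===== Notes on version B (the rewrite author's own statement) =====
-- stated objective: simpler
-- what changed: One fused pass: for each window start i the bucket key is toks[i] and the appended tail is the slice toks[i+1:i+n] via dict.setdefault, instead of A's three loops (an inner while copying tokens one by one into an intermediate list of gram tuples, then a second grouping pass rebuilding each tail with an index comprehension).
import Mathlib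
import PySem

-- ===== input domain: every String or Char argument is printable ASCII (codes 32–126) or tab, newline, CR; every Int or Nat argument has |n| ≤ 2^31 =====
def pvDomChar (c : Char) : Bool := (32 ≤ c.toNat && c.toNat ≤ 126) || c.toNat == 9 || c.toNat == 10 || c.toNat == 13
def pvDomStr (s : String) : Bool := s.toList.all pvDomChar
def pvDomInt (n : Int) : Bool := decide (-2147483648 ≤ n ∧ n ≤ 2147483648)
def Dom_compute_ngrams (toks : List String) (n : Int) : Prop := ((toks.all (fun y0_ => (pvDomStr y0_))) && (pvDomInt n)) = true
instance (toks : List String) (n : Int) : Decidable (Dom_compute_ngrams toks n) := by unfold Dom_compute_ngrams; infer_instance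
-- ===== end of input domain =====

-- B replaces A's three loops (inner while building each gram, then a second grouping pass)
-- by one fused pass using setdefault and slicing; objective: simpler. Equal return value on Pre_.

-- ===== PORT A =====
-- the inner 'while j < (i+n): arr1.append(toks[j]); j += 1' loop (index always in range on Pre_)
def pvWhileGram (toks : List String) (stop : Int) (j : Int) (arr1 : List String) : List String :=
  if j < stop then
    pvWhileGram toks stop (j + 1) (arr1 ++ [PySem.List.pyGetD toks j ""])
  else arr1
termination_by (stop - j).toNat
decreasing_by omega

def compute_ngrams (toks : List String) (n : Int) : List (String × List (List String)) :=
  let arr : List (List String) :=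
    (PySem.List.pyRange 0 (PySem.List.len toks - (n - 1))).foldl
      (fun arr i => arr ++ [pvWhileGram toks (i + n) i []]) []
  let d : PySem.Dict String (List (List String)) :=
    arr.foldl
      (fun d g =>
        if PySem.Dict.contains d (PySem.List.pyGetD g 0 "") = false then
          d.insert (PySem.List.pyGetD g 0 "")
            [(PySem.List.pyRange 1 (PySem.List.len g)).map (fun k => PySem.List.pyGetD g k "")]
        else
          d.modify (PySem.List.pyGetD g 0 "") []
            (fun v => v ++ [(PySem.List.pyRange 1 (PySem.List.len g)).map (fun k => PySem.List.pyGetD g k "")]))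
      PySem.Dict.empty
  d.items

-- ===== PORT B =====
def compute_ngrams_alt (toks : List String) (n : Int) : List (String × List (List String)) :=
  ((PySem.List.pyRange 0 (PySem.List.len toks - (n - 1))).foldl
    (fun d i =>
      ((d.setdefault (PySem.List.pyGetD toks i "") []).modify (PySem.List.pyGetD toks i "") []
        (fun v => v ++ [PySem.List.slice toks (some (i + 1)) (some (i + n))])))
    (PySem.Dict.empty : PySem.Dict String (List (List String)))).items

-- ===== PRECONDITION & SPEC =====
-- Pre_ excludes exactly n ≤ 0, where A (and B) raise IndexError on every toks ('( )[0]' on the empty gram tuple).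
def Pre_compute_ngrams (toks : List String) (n : Int) : Prop := 1 ≤ n
instance (toks : List String) (n : Int) : Decidable (Pre_compute_ngrams toks n) := by unfold Pre_compute_ngrams; infer_instance
def pvWitness_compute_ngrams : List String × Int := (["a", "b", "a", "c"], 2)
def Spec_compute_ngrams (toks : List String) (n : Int) (out : List (String × List (List String))) : Prop := out = compute_ngrams_alt toks n
instance (toks : List String) (n : Int) (out : List (String × List (List String))) : Decidable (Spec_compute_ngrams toks n out) := by unfold Spec_compute_ngrams; infer_instance

-- ===== CLAIM (what is proved, stated in full; the proofs are below) =====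
def Claim_equal_compute_ngrams : Prop := ∀ (toks : List String) (n : Int), Dom_compute_ngrams toks n → Pre_compute_ngrams toks n → Spec_compute_ngrams toks n (compute_ngrams toks n)

-- ===== LEMMAS AND PROOFS =====

-- the while loop is the map of indexing over the index range
theorem pvWhileGram_eq (toks : List String) (stop : Int) :
    ∀ (m : Nat) (j : Int) (acc : List String), (stop - j).toNat = m →
      pvWhileGram toks stop j acc =
        acc ++ (PySem.List.pyRange j stop).map (fun k => PySem.List.pyGetD toks k "") := by
  intro m
  induction m with
  | zero =>
    intro j acc hm
    rw [pvWhileGram, if_neg (by omega), PySem.List.pyRange_one_eq_nil (by omega)]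
    simp
  | succ m ih =>
    intro j acc hm
    have hj : j < stop := by omega
    rw [pvWhileGram, if_pos hj, ih (j + 1) _ (by omega), PySem.List.pyRange_one_cons hj]
    simp

-- mapping indexing over a bounded range is drop-then-take
theorem pv_map_pyGetD_range (xs : List String) :
    ∀ (m : Nat) (a b : Int), (b - a).toNat = m → 0 ≤ a → b ≤ (xs.length : Int) →
      (PySem.List.pyRange a b).map (fun k => PySem.List.pyGetD xs k "") =
        (xs.drop a.toNat).take (b - a).toNat := by
  intro m
  induction m with
  | zero =>
    intro a b hm _ _
    rw [PySem.List.pyRange_one_eq_nil (by omega)]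
    simp [hm]
  | succ m ih =>
    intro a b hm ha hb
    have hab : a < b := by omega
    have hlt : a.toNat < xs.length := by omega
    rw [PySem.List.pyRange_one_cons hab]
    have hget : PySem.List.pyGetD xs a "" = xs[a.toNat] :=
      PySem.List.pyGetD_eq_getElem xs "" ha (by omega)
    have hdrop : xs.drop a.toNat = xs[a.toNat] :: xs.drop (a.toNat + 1) :=
      List.drop_eq_getElem_cons hlt
    rw [List.map_cons, hget, ih (a + 1) b (by omega) (by omega) hb, hdrop, hm]
    have h1 : (a + 1).toNat = a.toNat + 1 := by omega
    have h2 : (b - (a + 1)).toNat = m := by omega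
    rw [h1, h2, List.take_succ_cons]

-- A's per-gram step equals B's setdefault-then-append step
theorem pv_step_eq (d : PySem.Dict String (List (List String))) (k : String) (r : List String) :
    (if PySem.Dict.contains d k = false then d.insert k [r] else d.modify k [] (fun v => v ++ [r])) =
      (d.setdefault k []).modify k [] (fun v => v ++ [r]) := by
  by_cases h : PySem.Dict.contains d k = true
  · rw [if_neg (by simp [h]), PySem.Dict.setdefault, if_pos h]
  · have hany : (d.items.any fun p => p.1 == k) = false := by
      rw [show (d.items.any fun p => p.1 == k) = PySem.Dict.contains d k from rfl]
      exact Bool.eq_false_iff.mpr h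
    have hno : ∀ p ∈ d.items, (p.1 == k) = false := by
      intro p hp
      have := List.any_eq_false.mp hany p hp
      simpa using this
    rw [if_pos (by simp [PySem.Dict.contains, hany])]
    rw [PySem.Dict.setdefault, if_neg (by simp [PySem.Dict.contains, hany])]
    have hfind : d.items.find? (fun p => p.1 == k) = none :=
      List.find?_eq_none.mpr (fun p hp => by simp [hno p hp])
    have hget : (PySem.Dict.mk (d.items ++ [(k, ([] : List (List String)))])).getD k [] = [] := by
      simp [PySem.Dict.getD, PySem.Dict.get?, List.find?_append, hfind]
    rw [PySem.Dict.modify, hget]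
    have hc' : (PySem.Dict.mk (d.items ++ [(k, ([] : List (List String)))])).contains k = true := by
      simp [PySem.Dict.contains]
    rw [PySem.Dict.insert, PySem.Dict.insert, if_neg (by simp [PySem.Dict.contains, hany]), if_pos hc']
    have hmap : d.items.map (fun p => if (p.1 == k) = true then (k, ([] : List (List String)) ++ [r]) else p)
        = d.items := by
      rw [List.map_congr_left (g := id) (fun p hp => by simp [hno p hp]), List.map_id]
    simp only [PySem.Dict.mk.injEq, List.map_append, hmap]
    simp

-- ===== VERDICT (by name: the statement is the Claim_ definition above) =====
theorem compute_ngrams_spec : Claim_equal_compute_ngrams := by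
  intro toks n _ hn
  unfold Spec_compute_ngrams compute_ngrams compute_ngrams_alt
  simp only []
  rw [PySem.List.foldl_append_singleton_eq_map (fun i => pvWhileGram toks (i + n) i []), List.nil_append,
    List.foldl_map]
  refine congrArg PySem.Dict.items (PySem.List.foldl_congr_mem _ _ _ _ ?_)
  intro d i hi
  rw [PySem.List.mem_pyRange_one] at hi
  have hlen : PySem.List.len toks = (toks.length : Int) := by simp [PySem.List.len]
  have hi0 : 0 ≤ i := hi.1
  have hbound : i + n ≤ (toks.length : Int) := by
    have h2 := hi.2
    rw [hlen] at h2
    omega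
  have hn1 : (1 : Int) ≤ n := hn
  have hcons : pvWhileGram toks (i + n) i [] =
      PySem.List.pyGetD toks i "" ::
        (PySem.List.pyRange (i + 1) (i + n)).map (fun k => PySem.List.pyGetD toks k "") := by
    rw [pvWhileGram_eq toks (i + n) (i + n - i).toNat i [] rfl,
      PySem.List.pyRange_one_cons (by omega), List.map_cons]
    simp
  have hkey : PySem.List.pyGetD (pvWhileGram toks (i + n) i []) 0 "" = PySem.List.pyGetD toks i "" := by
    rw [hcons, PySem.List.pyGetD_eq_getElem _ "" (by omega) (by simp)]
    simp
  have hrest : (PySem.List.pyRange 1 (PySem.List.len (pvWhileGram toks (i + n) i []))).map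
        (fun k => PySem.List.pyGetD (pvWhileGram toks (i + n) i []) k "") =
      PySem.List.slice toks (some (i + 1)) (some (i + n)) := by
    rw [PySem.List.map_pyGetD_pyRange _ _ (by omega), hcons]
    rw [PySem.List.slice_of_nonneg toks (by omega) (by omega) (by omega) hbound,
      pv_map_pyGetD_range toks (i + n - (i + 1)).toNat (i + 1) (i + n) rfl (by omega) hbound]
    simp
    omega
  rw [hkey, hrest, pv_step_eq]
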